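-- pv_equiv track=rewrite | github.com/BronxBombers/CS1-Project | company_complaints.py | split_dictionary
-- ===== SOURCE A (Python) =====
-- def split_dictionary(companymap):
--     """
--     Purpose: Utility function used to split the dictionary of dictionaries into a company based and product based dictionary
--     :param companymap: company map dictionary
--     :return: product dictionary with value being the amount of complaints for that product, and a company dictionary with
--     the values being the amount of complaints that company has
--     """
--     company_complaints = {}
--     product_complaints = {}
--     for key in companymap:
--         for product in companymap[key]:
--             if product in product_complaints:
--                 product_complaints[product] += len(companymap[key][product])
--             if key in company_complaints:
--                 company_complaints[key] += len(companymap[key][product])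
--             if not key in company_complaints:
--                 company_complaints[key] = len(companymap[key][product])
--             if not product in product_complaints:
--                 product_complaints[product] = len(companymap[key][product])
--     return company_complaints, product_complaints
-- ===== SOURCE B (Python) =====
-- def split_dictionary(companymap):
--     company_complaints = {key: sum(len(v) for v in prods.values())
--                           for key, prods in companymap.items() if prods}
--     order = dict.fromkeys(p for prods in companymap.values() for p in prods)
--     product_complaints = {p: sum(len(prods[p]) for prods in companymap.values() if p in prods)
--                           for p in order}
--     return company_complaints, product_complaints
-- ===== Notes on version B (the rewrite author's own statement) =====
-- stated objective: alternative
-- what changed: A's single interleaved loop accumulating both dicts with four membership-tested branches is replaced by: company totals as a direct per-company closed-form sum (dict comprehension), and product totals computed with NO accumulator at all - the distinct products are listed first (dict.fromkeys) and then each product's total is a fresh cross-company scan summing len(prods[p]) over the companies containing p.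
import Mathlib
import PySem

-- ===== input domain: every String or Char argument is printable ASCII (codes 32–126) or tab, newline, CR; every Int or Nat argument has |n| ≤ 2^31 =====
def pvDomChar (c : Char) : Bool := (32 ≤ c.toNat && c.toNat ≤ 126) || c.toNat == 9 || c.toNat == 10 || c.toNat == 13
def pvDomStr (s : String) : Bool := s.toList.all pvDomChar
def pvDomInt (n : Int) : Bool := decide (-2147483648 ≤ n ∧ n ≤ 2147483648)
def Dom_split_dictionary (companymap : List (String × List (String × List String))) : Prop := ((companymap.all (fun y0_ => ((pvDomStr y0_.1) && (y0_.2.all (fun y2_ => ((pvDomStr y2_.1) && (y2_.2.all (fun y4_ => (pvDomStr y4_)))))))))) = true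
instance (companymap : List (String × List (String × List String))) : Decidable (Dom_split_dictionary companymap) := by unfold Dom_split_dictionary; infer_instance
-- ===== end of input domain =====

-- B replaces A's interleaved accumulating loop by a per-company closed-form sum for the
-- company totals and, for the product totals, a per-product cross-company scan over the
-- first-occurrence product list — no accumulating dict at all (objective: alternative).

-- ===== PORT A =====
-- Literal port of A: iterate the keys of companymap, look the inner dict up, iterate its
-- keys, look each value up, and run the four membership-tested branches in A's order.
def split_dictionary (companymap : List (String × List (String × List String))) : (List (String × Int)) × (List (String × Int)) :=
  let st :=
    companymap.foldl
      (fun (st : PySem.Dict String Int × PySem.Dict String Int) kp =>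
        let key := kp.1
        let inner := (PySem.Dict.mk companymap).getD key []
        inner.foldl
          (fun st pp =>
            let product := pp.1
            let n : Int := ((PySem.Dict.mk inner).getD product []).length
            let pc := if st.2.contains product then st.2.insert product (st.2.getD product 0 + n) else st.2
            let cc := if st.1.contains key then st.1.insert key (st.1.getD key 0 + n) else st.1
            let cc := if !(cc.contains key) then cc.insert key n else cc
            let pc := if !(pc.contains product) then pc.insert product n else pc
            (cc, pc)) st)
      (PySem.Dict.empty, PySem.Dict.empty)
  (st.1.items, st.2.items)

-- ===== PORT B =====
-- Port of Source B: company totals as a per-company closed-form sum; 'order' is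
-- dict.fromkeys over the flattened product keys (= PySem.Set.ofList, first occurrences);
-- each product's total is a fresh scan over the companies whose inner dict contains it.
def split_dictionary_alt (companymap : List (String × List (String × List String))) : (List (String × Int)) × (List (String × Int)) :=
  let company_complaints :=
    (companymap.filter (fun p => !p.2.isEmpty)).map
      (fun p => (p.1, (p.2.map (fun q => (q.2.length : Int))).sum))
  let order := PySem.Set.ofList (companymap.flatMap (fun p => p.2.map (·.1)))
  let product_complaints :=
    order.map (fun pr =>
      (pr, ((companymap.filter (fun p => (PySem.Dict.mk p.2).contains pr)).map
              (fun p => (((PySem.Dict.mk p.2).getD pr []).length : Int))).sum))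
  (company_complaints, product_complaints)

-- ===== PRECONDITION & SPEC =====
-- companymap is a Python dict of dicts, so its key list and every inner key list are
-- duplicate-free; Pre_ excludes only association lists with duplicate keys, which do not
-- represent any Python input (every actual dict argument satisfies Pre_).
def Pre_split_dictionary (companymap : List (String × List (String × List String))) : Prop :=
  (companymap.map (·.1)).Nodup ∧ ∀ p ∈ companymap, (p.2.map (·.1)).Nodup
instance (companymap : List (String × List (String × List String))) : Decidable (Pre_split_dictionary companymap) := by unfold Pre_split_dictionary; infer_instance

def pvWitness_split_dictionary : (List (String × List (String × List String))) :=
  [("acme", [("loan", ["c1", "c2"]), ("card", ["c3"])]), ("globex", [("loan", ["c4"])])]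

def Spec_split_dictionary (companymap : List (String × List (String × List String))) (out : (List (String × Int)) × (List (String × Int))) : Prop := out = split_dictionary_alt companymap
instance (companymap : List (String × List (String × List String))) (out : (List (String × Int)) × (List (String × Int))) : Decidable (Spec_split_dictionary companymap out) := by unfold Spec_split_dictionary; infer_instance

-- ===== CLAIM (what is proved, stated in full; the proofs are below) =====
def Claim_equal_split_dictionary : Prop := ∀ (companymap : List (String × List (String × List String))), Dom_split_dictionary companymap → Pre_split_dictionary companymap → Spec_split_dictionary companymap (split_dictionary companymap)

-- ===== LEMMAS AND PROOFS =====

-- A's conditional-increment-then-conditional-insert chain at a key is insert-or-add.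
theorem bump_eq (d : PySem.Dict String Int) (k : String) (n : Int) :
    (let d1 := if d.contains k then d.insert k (d.getD k 0 + n) else d;
     if !(d1.contains k) then d1.insert k n else d1) = d.insert k (d.getD k 0 + n) := by
  cases h : d.contains k with
  | true => simp
  | false => simp [h, PySem.Dict.getD_of_not_contains d 0 h]

-- One pass of A's inner body equals a pair of independent insert-or-adds.
theorem step_eq (cc pc : PySem.Dict String Int) (k p : String) (n : Int) :
    (let pc1 := if pc.contains p then pc.insert p (pc.getD p 0 + n) else pc
     let cc1 := if cc.contains k then cc.insert k (cc.getD k 0 + n) else cc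
     let cc2 := if !(cc1.contains k) then cc1.insert k n else cc1
     let pc2 := if !(pc1.contains p) then pc1.insert p n else pc1
     (cc2, pc2)) = (cc.insert k (cc.getD k 0 + n), pc.insert p (pc.getD p 0 + n)) := by
  have h1 := bump_eq cc k n
  have h2 := bump_eq pc p n
  simp only [] at h1 h2 ⊢
  rw [h1, h2]

-- Repeated insert-or-add at one fixed key accumulates the sum.
theorem foldl_bump_const (k : String) (t : List (String × List String)) :
    ∀ (d : PySem.Dict String Int) (n : Int),
    t.foldl (fun d q => d.insert k (d.getD k 0 + (q.2.length : Int))) (d.insert k n)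
      = d.insert k (n + (t.map (fun q => (q.2.length : Int))).sum) := by
  induction t with
  | nil => intro d n; simp
  | cons q t ih =>
      intro d n
      simp only [List.foldl_cons, PySem.Dict.getD_insert_self, PySem.Dict.insert_insert_self,
        List.map_cons, List.sum_cons]
      rw [ih]
      ring_nf

-- The company side of the fold appends one (key, total) pair per nonempty inner dict.
theorem company_items (m : List (String × List (String × List String))) :
    ∀ (cc : PySem.Dict String Int),
    (m.map (·.1)).Nodup → (∀ p ∈ m, cc.contains p.1 = false) →
    (m.foldl (fun cc p => p.2.foldl
        (fun cc q => cc.insert p.1 (cc.getD p.1 0 + (q.2.length : Int))) cc) cc).items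
      = cc.items ++ (m.filter (fun p => !p.2.isEmpty)).map
          (fun p => (p.1, (p.2.map (fun q => (q.2.length : Int))).sum)) := by
  induction m with
  | nil => intro cc _ _; simp
  | cons p m ih =>
      intro cc hnd hfr
      have hndm : (m.map (·.1)).Nodup := (List.nodup_cons.mp hnd).2
      have hp1 : p.1 ∉ m.map (·.1) := (List.nodup_cons.mp hnd).1
      have hfrp : cc.contains p.1 = false := hfr p (by simp)
      cases hq : p.2 with
      | nil =>
          simp only [List.foldl_cons, hq, List.foldl_nil, List.filter_cons,
            List.isEmpty_nil, Bool.not_true]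
          rw [ih cc hndm (fun r hr => hfr r (List.mem_cons_of_mem _ hr))]
          simp
      | cons q t =>
          simp only [List.foldl_cons, hq]
          rw [PySem.Dict.getD_of_not_contains cc 0 hfrp, foldl_bump_const]
          set S : Int := 0 + (q.2.length : Int) + (t.map (fun q => (q.2.length : Int))).sum with hS
          have hfr' : ∀ r ∈ m, (cc.insert p.1 S).contains r.1 = false := by
            intro r hr
            rw [PySem.Dict.contains_insert]
            have : r.1 ≠ p.1 := by
              intro h; exact hp1 (h ▸ List.mem_map.mpr ⟨r, hr, rfl⟩)
            simp [this, hfr r (List.mem_cons_of_mem _ hr)]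
          rw [ih (cc.insert p.1 S) hndm hfr',
            PySem.Dict.items_insert_of_not_contains cc S hfrp]
          have hsum : S = ((q :: t).map (fun q => (q.2.length : Int))).sum := by
            simp [hS]
          simp only [List.filter_cons, hq, List.isEmpty_cons, Bool.not_false, if_true,
            List.map_cons, List.append_assoc, List.cons_append, List.nil_append]
          rw [hsum]
          simp

-- The insert-or-add fold's value at a key is the sum of the matching pairs' values.
theorem getD_foldl_insert_add (l : List (String × Int)) :
    ∀ (d : PySem.Dict String Int) (pr : String),
    (l.foldl (fun d pn => d.insert pn.1 (d.getD pn.1 0 + pn.2)) d).getD pr 0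
      = d.getD pr 0 + ((l.filter (fun pn => pn.1 == pr)).map (·.2)).sum := by
  induction l with
  | nil => intro d pr; simp
  | cons pn t ih =>
      intro d pr
      by_cases h : pn.1 = pr
      · subst h
        simp only [List.foldl_cons, List.filter_cons, beq_self_eq_true, if_true,
          List.map_cons, List.sum_cons]
        rw [ih, PySem.Dict.getD_insert_self]
        ring
      · have hb : (pn.1 == pr) = false := by simp [h]
        simp only [List.foldl_cons, List.filter_cons, hb, Bool.false_eq_true, if_false]
        rw [ih, PySem.Dict.getD_insert_of_ne]
        exact fun hc => h hc.symm

-- Within one (nodup-keyed) inner dict, the matching-pairs sum is len(prods[pr]) or 0.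
theorem pv_inner_sum (pr : String) :
    ∀ (t : List (String × List String)), (t.map (·.1)).Nodup →
    (((t.map (fun q => (q.1, (q.2.length : Int)))).filter (fun pn => pn.1 == pr)).map (·.2)).sum
      = if (PySem.Dict.mk t).contains pr then (((PySem.Dict.mk t).getD pr []).length : Int) else 0 := by
  intro t
  induction t with
  | nil => intro _; simp [PySem.Dict.contains]
  | cons q t ih =>
      intro hnd
      have hq1 : q.1 ∉ t.map (·.1) := (List.nodup_cons.mp hnd).1
      have hndt : (t.map (·.1)).Nodup := (List.nodup_cons.mp hnd).2
      by_cases h : q.1 = pr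
      · subst h
        have hrest : ((t.map (fun q => (q.1, (q.2.length : Int)))).filter
            (fun pn => pn.1 == q.1)) = [] := by
          rw [List.filter_eq_nil_iff]
          intro pn hpn
          obtain ⟨r, hr, rfl⟩ := List.mem_map.mp hpn
          simp only [beq_iff_eq]
          intro hc; exact hq1 (hc ▸ List.mem_map.mpr ⟨r, hr, rfl⟩)
        simp [hrest, PySem.Dict.contains, PySem.Dict.getD, PySem.Dict.get?, List.find?]
      · have hb : (q.1 == pr) = false := by simp [h]
        have hcontains : (PySem.Dict.mk (q :: t)).contains pr = (PySem.Dict.mk t).contains pr := by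
          simp [PySem.Dict.contains, h]
        have hgetD : (PySem.Dict.mk (q :: t)).getD pr [] = (PySem.Dict.mk t).getD pr [] := by
          simp [PySem.Dict.getD, PySem.Dict.get?, List.find?, hb]
        simp only [List.map_cons, List.filter_cons, hb, Bool.false_eq_true, if_false]
        rw [ih hndt, hcontains, hgetD]

-- Across companies: the flattened matching-pairs sum is B's cross-company scan.
theorem pv_prod_sum (pr : String) :
    ∀ (m : List (String × List (String × List String))),
    (∀ p ∈ m, (p.2.map (·.1)).Nodup) →
    (((m.flatMap (fun p => p.2.map (fun q => (q.1, (q.2.length : Int))))).filter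
        (fun pn => pn.1 == pr)).map (·.2)).sum
      = ((m.filter (fun p => (PySem.Dict.mk p.2).contains pr)).map
          (fun p => (((PySem.Dict.mk p.2).getD pr []).length : Int))).sum := by
  intro m
  induction m with
  | nil => intro _; simp
  | cons p t ih =>
      intro hin
      have hp := hin p (by simp)
      have ht : ∀ r ∈ t, (r.2.map (·.1)).Nodup := fun r hr => hin r (List.mem_cons_of_mem _ hr)
      simp only [List.flatMap_cons, List.filter_append, List.map_append, List.sum_append,
        List.filter_cons]
      rw [pv_inner_sum pr p.2 hp, ih ht]
      by_cases h : (PySem.Dict.mk p.2).contains pr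
      · simp [h]
      · simp [h]

-- ===== VERDICT (by name: the statement is the Claim_ definition above) =====
theorem split_dictionary_spec : Claim_equal_split_dictionary := by
  intro m _ hpre
  obtain ⟨hout, hin⟩ := hpre
  have hinm : ∀ p ∈ m, (p.2.map (·.1)).Nodup := hin
  unfold Spec_split_dictionary split_dictionary split_dictionary_alt
  simp only []
  -- step 1: replace the dictionary lookups by the pair components, and the four-branch
  -- body by the pair of independent insert-or-adds
  rw [PySem.List.foldl_congr_mem m _
      (fun (st : PySem.Dict String Int × PySem.Dict String Int) p =>
        p.2.foldl (fun st q =>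
          (st.1.insert p.1 (st.1.getD p.1 0 + (q.2.length : Int)),
           st.2.insert q.1 (st.2.getD q.1 0 + (q.2.length : Int)))) st)
      (PySem.Dict.empty, PySem.Dict.empty) ?_]
  · -- step 2: split the paired fold into its two independent folds
    rw [PySem.List.foldl_congr_mem m _
        (fun (st : PySem.Dict String Int × PySem.Dict String Int) p =>
          (p.2.foldl (fun cc q => cc.insert p.1 (cc.getD p.1 0 + (q.2.length : Int))) st.1,
           p.2.foldl (fun pc q => pc.insert q.1 (pc.getD q.1 0 + (q.2.length : Int))) st.2))
        (PySem.Dict.empty, PySem.Dict.empty)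
        (by
          intro st p _
          exact PySem.List.foldl_prod_mk
            (fun cc q => cc.insert p.1 (cc.getD p.1 0 + (q.2.length : Int)))
            (fun pc q => pc.insert q.1 (pc.getD q.1 0 + (q.2.length : Int))) p.2 st.1 st.2)]
    rw [PySem.List.foldl_prod_mk
        (fun cc p => p.2.foldl (fun cc q => cc.insert p.1 (cc.getD p.1 0 + (q.2.length : Int))) cc)
        (fun pc p => p.2.foldl (fun pc q => pc.insert q.1 (pc.getD q.1 0 + (q.2.length : Int))) pc)
        m PySem.Dict.empty PySem.Dict.empty]
    refine Prod.ext ?_ ?_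
    · -- fst: the company totals
      dsimp only
      rw [company_items m PySem.Dict.empty hout (fun p _ => rfl)]
      rfl
    · -- snd: the product fold, flattened and then read off key by key
      dsimp only
      have hflat : (m.foldl (fun (pc : PySem.Dict String Int) p =>
            p.2.foldl (fun pc q => pc.insert q.1 (pc.getD q.1 0 + (q.2.length : Int))) pc)
            PySem.Dict.empty)
          = (m.flatMap (fun p => p.2.map (fun q => (q.1, (q.2.length : Int))))).foldl
              (fun d pn => d.insert pn.1 (d.getD pn.1 0 + pn.2)) PySem.Dict.empty := by
        rw [List.foldl_flatMap]
        refine (PySem.List.foldl_congr_mem m _ _ PySem.Dict.empty ?_).symm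
        intro acc p _
        rw [List.foldl_map]
      rw [hflat]
      set flat := m.flatMap (fun p => p.2.map (fun q => (q.1, (q.2.length : Int)))) with hflatdef
      have hnd : ((flat.foldl (fun (d : PySem.Dict String Int) pn =>
          d.insert pn.1 (d.getD pn.1 0 + pn.2)) PySem.Dict.empty)).keys.Nodup := by
        exact PySem.Dict.nodup_keys_foldl_insert_key flat Prod.fst
          (fun d pn => d.getD pn.1 0 + pn.2) PySem.Dict.empty PySem.Dict.nodup_keys_empty
      rw [PySem.Dict.items_eq_map_keys _ hnd 0]
      have hkeys : ((flat.foldl (fun (d : PySem.Dict String Int) pn =>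
          d.insert pn.1 (d.getD pn.1 0 + pn.2)) PySem.Dict.empty)).keys
          = PySem.Set.ofList (m.flatMap (fun p => p.2.map (·.1))) := by
        rw [PySem.Dict.keys_foldl_insert_key flat Prod.fst
          (fun d pn => d.getD pn.1 0 + pn.2) PySem.Dict.empty]
        rw [PySem.Dict.keys_empty, PySem.Set.update_nil_left, hflatdef]
        congr 1
        simp [List.map_flatMap, List.map_map, Function.comp_def]
      rw [hkeys]
      refine List.map_congr_left ?_
      intro pr _
      have hgetD := getD_foldl_insert_add flat PySem.Dict.empty pr
      rw [PySem.Dict.getD_empty] at hgetD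
      rw [hgetD, hflatdef, pv_prod_sum pr m hinm]
      simp
  · -- the lookup/branch body agrees with the clean body on members of m
    intro st p hp
    have hmem : (p.1, p.2) ∈ (PySem.Dict.mk m).items := hp
    have hkeys : (PySem.Dict.mk m).keys.Nodup := hout
    have hget : (PySem.Dict.mk m).getD p.1 [] = p.2 := by
      rw [PySem.Dict.getD_eq_get?_getD, PySem.Dict.get?_of_mem_items _ hmem hkeys]
      rfl
    simp only [hget]
    refine PySem.List.foldl_congr_mem p.2 _ _ st ?_
    intro st q hq
    have hinmem : (q.1, q.2) ∈ (PySem.Dict.mk p.2).items := hq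
    have hinkeys : (PySem.Dict.mk p.2).keys.Nodup := hin p hp
    have hget2 : (PySem.Dict.mk p.2).getD q.1 [] = q.2 := by
      rw [PySem.Dict.getD_eq_get?_getD, PySem.Dict.get?_of_mem_items _ hinmem hinkeys]
      rfl
    simp only [hget2]
    exact step_eq st.1 st.2 p.1 q.1 (q.2.length : Int)
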